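-- pv_equiv track=rewrite | github.com/kshivam4781/FMCSAData | script/headless_automation/comprehensive_extract_status43.py | extract_detail_fields
-- ===== SOURCE A (Python) =====
-- def extract_detail_fields(detail_data):
--     """Extract Status and Statement of Info Due Date from detail response"""
--     status_value = None
--     statement_due_date = None
--
--     if detail_data and 'DRAWER_DETAIL_LIST' in detail_data:
--         for item in detail_data['DRAWER_DETAIL_LIST']:
--             if item.get('LABEL') == 'Status':
--                 status_value = item.get('VALUE')
--             elif item.get('LABEL') == 'Statement of Info Due Date':
--                 statement_due_date = item.get('VALUE')
--
--     return {
--         'STATUS_DETAIL': status_value,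
--         'STATEMENT_OF_INFO_DUE_DATE': statement_due_date
--     }
-- ===== SOURCE B (Python) =====
-- def extract_detail_fields(detail_data):
--     """Extract Status and Statement of Info Due Date from detail response"""
--     items = detail_data['DRAWER_DETAIL_LIST'] if detail_data and 'DRAWER_DETAIL_LIST' in detail_data else []
--
--     def last_value(label):
--         return next((item.get('VALUE') for item in reversed(items)
--                      if item.get('LABEL') == label), None)
--
--     return {
--         'STATUS_DETAIL': last_value('Status'),
--         'STATEMENT_OF_INFO_DUE_DATE': last_value('Statement of Info Due Date'),
--     }
-- ===== Notes on version B (the rewrite author's own statement) =====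
-- stated objective: alternative
-- what changed: B replaces A's forward loop that keeps reassigning two accumulator variables with two backward searches (next over reversed(items)) that return the last matching VALUE for each label directly, with early exit.
import Mathlib
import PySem

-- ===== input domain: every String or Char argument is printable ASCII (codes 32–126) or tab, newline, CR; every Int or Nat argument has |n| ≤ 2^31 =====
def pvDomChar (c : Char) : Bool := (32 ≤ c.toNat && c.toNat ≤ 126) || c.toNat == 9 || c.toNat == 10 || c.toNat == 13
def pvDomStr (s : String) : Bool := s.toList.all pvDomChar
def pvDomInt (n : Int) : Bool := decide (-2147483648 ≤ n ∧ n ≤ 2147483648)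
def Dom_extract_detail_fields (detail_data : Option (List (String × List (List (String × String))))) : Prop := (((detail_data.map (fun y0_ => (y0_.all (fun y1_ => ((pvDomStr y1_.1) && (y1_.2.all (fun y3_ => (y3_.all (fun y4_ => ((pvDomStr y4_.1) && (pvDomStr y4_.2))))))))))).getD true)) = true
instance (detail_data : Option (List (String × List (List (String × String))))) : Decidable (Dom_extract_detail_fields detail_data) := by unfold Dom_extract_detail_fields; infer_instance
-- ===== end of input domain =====

-- B replaces A's forward accumulator loop by two backward searches (first match over the reversed list)
-- that yield the last matching VALUE for each label directly; an alternative of the same cost.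


-- ===== PORT A =====
-- A's for-loop: state (status_value, statement_due_date), branches in A's order
def pvLoopA : List (List (String × String)) → Option String × Option String → Option String × Option String
  | [], st => st
  | item :: rest, (s, d) =>
    if (PySem.Dict.mk item).get? "LABEL" = some "Status" then
      pvLoopA rest ((PySem.Dict.mk item).get? "VALUE", d)
    else if (PySem.Dict.mk item).get? "LABEL" = some "Statement of Info Due Date" then
      pvLoopA rest (s, (PySem.Dict.mk item).get? "VALUE")
    else
      pvLoopA rest (s, d)

def extract_detail_fields (detail_data : Option (List (String × List (List (String × String))))) : List (String × Option String) :=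
  let st :=
    match detail_data with
    | none => ((none : Option String), (none : Option String))  -- `detail_data` falsy
    | some l =>
      -- `detail_data and 'DRAWER_DETAIL_LIST' in detail_data`; the subscript cannot raise
      -- under the `contains` guard, so `getD … []` is exact here
      if !l.isEmpty && (PySem.Dict.mk l).contains "DRAWER_DETAIL_LIST" then
        pvLoopA ((PySem.Dict.mk l).getD "DRAWER_DETAIL_LIST" []) (none, none)
      else (none, none)
  [("STATUS_DETAIL", st.1), ("STATEMENT_OF_INFO_DUE_DATE", st.2)]

-- ===== PORT B =====
-- Source B's `last_value`: first match over the reversed item list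
def pvLastValue (items : List (List (String × String))) (label : String) : Option String :=
  match items.reverse.find? (fun item => (PySem.Dict.mk item).get? "LABEL" == some label) with
  | some item => (PySem.Dict.mk item).get? "VALUE"
  | none => none

def extract_detail_fields_alt (detail_data : Option (List (String × List (List (String × String))))) : List (String × Option String) :=
  let items : List (List (String × String)) :=
    match detail_data with
    | none => []
    | some l =>
      if !l.isEmpty && (PySem.Dict.mk l).contains "DRAWER_DETAIL_LIST" then
        (PySem.Dict.mk l).getD "DRAWER_DETAIL_LIST" []
      else []
  [("STATUS_DETAIL", pvLastValue items "Status"),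
   ("STATEMENT_OF_INFO_DUE_DATE", pvLastValue items "Statement of Info Due Date")]

-- ===== PRECONDITION & SPEC =====
def Spec_extract_detail_fields (detail_data : Option (List (String × List (List (String × String))))) (out : List (String × Option String)) : Prop := out = extract_detail_fields_alt detail_data
instance (detail_data : Option (List (String × List (List (String × String))))) (out : List (String × Option String)) : Decidable (Spec_extract_detail_fields detail_data out) := by unfold Spec_extract_detail_fields; infer_instance

-- ===== CLAIM (what is proved, stated in full; the proofs are below) =====
def Claim_equal_extract_detail_fields : Prop := ∀ (detail_data : Option (List (String × List (List (String × String))))), Dom_extract_detail_fields detail_data → Spec_extract_detail_fields detail_data (extract_detail_fields detail_data)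

-- ===== LEMMAS AND PROOFS =====

-- pvLastValue generalized to an arbitrary default (the accumulator's incoming value)
def pvLastValueD (items : List (List (String × String))) (label : String) (dflt : Option String) : Option String :=
  match items.reverse.find? (fun item => (PySem.Dict.mk item).get? "LABEL" == some label) with
  | some item => (PySem.Dict.mk item).get? "VALUE"
  | none => dflt

theorem pvLastValueD_none (items : List (List (String × String))) (label : String) :
    pvLastValueD items label none = pvLastValue items label := by
  unfold pvLastValueD pvLastValue; rfl

theorem pvLastValueD_cons (rest : List (List (String × String))) (item : List (String × String))
    (label : String) (dflt : Option String) :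
    pvLastValueD (item :: rest) label dflt =
      pvLastValueD rest label
        (if (PySem.Dict.mk item).get? "LABEL" = some label
         then (PySem.Dict.mk item).get? "VALUE" else dflt) := by
  unfold pvLastValueD
  rw [List.reverse_cons, List.find?_append]
  cases h : rest.reverse.find? (fun item => (PySem.Dict.mk item).get? "LABEL" == some label) with
  | some it => simp
  | none =>
    by_cases hp : (PySem.Dict.mk item).get? "LABEL" = some label
    · simp [List.find?, hp]
    · have hb : ((PySem.Dict.mk item).get? "LABEL" == some label) = false := by
        simpa using hp
      simp [List.find?, hb]
      exact fun hx => absurd hx hp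

theorem pvLoopA_eq (items : List (List (String × String))) (s d : Option String) :
    pvLoopA items (s, d) =
      (pvLastValueD items "Status" s,
       pvLastValueD items "Statement of Info Due Date" d) := by
  induction items generalizing s d with
  | nil => unfold pvLoopA pvLastValueD; simp
  | cons item rest ih =>
    rw [pvLastValueD_cons, pvLastValueD_cons]
    by_cases h1 : (PySem.Dict.mk item).get? "LABEL" = some "Status"
    · have h2 : ¬ (PySem.Dict.mk item).get? "LABEL" = some "Statement of Info Due Date" := by
        rw [h1]; decide
      simp [pvLoopA, h1, ih]
    · by_cases h2 : (PySem.Dict.mk item).get? "LABEL" = some "Statement of Info Due Date"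
      · simp [pvLoopA, h2, ih]
      · simp [pvLoopA, h1, h2, ih]

-- ===== VERDICT (by name: the statement is the Claim_ definition above) =====
theorem extract_detail_fields_spec : Claim_equal_extract_detail_fields := by
  intro dd _
  unfold Spec_extract_detail_fields extract_detail_fields extract_detail_fields_alt
  cases dd with
  | none => rfl
  | some l =>
    by_cases h : (!l.isEmpty && (PySem.Dict.mk l).contains "DRAWER_DETAIL_LIST") = true
    · simp only [h, if_true, pvLoopA_eq, pvLastValueD_none]
    · simp only [h]
      rfl
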